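-- pv_equiv track=rewrite | github.com/Alferdize/Data-Structure-and-Algorithms | Algorithms/binary_search.com/z_sum.py | solve
-- ===== SOURCE A (Python) =====
-- def solve(matrix):
--     total = 0
--     n = len(matrix)
--     j = n - 2
--     for i in range(n):
--         if i == 0 or i == n - 1:
--             total += sum(matrix[i])
--         else:
--             total += matrix[i][j]
--             j -= 1
--     return total
-- ===== SOURCE B (Python) =====
-- def solve(matrix):
--     n = len(matrix)
--     return sum(v
--                for i, row in enumerate(matrix)
--                for j, v in enumerate(row)
--                if i == 0 or i == n - 1 or j == n - 1 - i)
-- ===== Notes on version B (the rewrite author's own statement) =====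
-- stated objective: alternative
-- what changed: B is a single flat filtered scan over ALL cells of the matrix, summing every value whose coordinates satisfy the Z predicate (i==0 or i==n-1 or j==n-1-i), instead of A's stateful row loop with a mutable decrementing column counter and direct indexing.
import Mathlib
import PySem

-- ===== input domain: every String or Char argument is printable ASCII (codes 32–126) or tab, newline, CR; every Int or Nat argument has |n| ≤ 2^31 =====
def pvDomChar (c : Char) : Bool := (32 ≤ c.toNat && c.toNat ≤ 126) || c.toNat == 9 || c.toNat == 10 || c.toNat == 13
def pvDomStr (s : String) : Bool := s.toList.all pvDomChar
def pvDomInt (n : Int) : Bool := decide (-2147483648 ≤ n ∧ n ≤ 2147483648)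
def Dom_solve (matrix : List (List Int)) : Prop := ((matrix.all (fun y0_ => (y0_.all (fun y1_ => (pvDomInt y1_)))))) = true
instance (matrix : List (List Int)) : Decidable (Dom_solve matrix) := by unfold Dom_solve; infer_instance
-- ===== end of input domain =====

-- B replaces A's stateful row loop (mutable decrementing column counter, direct indexing)
-- by one flat filtered scan over all cells, keeping those whose coordinates lie on the Z.

-- ===== PORT A =====
-- A's loop body over state (total, j)
def solveStep (matrix : List (List Int)) (n : Nat) (s : Int × Int) (i : Nat) : Int × Int :=
  if i = 0 ∨ i = n - 1 then
    (s.1 + (matrix.getD i []).sum, s.2)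
  else
    (s.1 + PySem.List.pyGetD (matrix.getD i []) s.2 0, s.2 - 1)

def solve (matrix : List (List Int)) : Int :=
  ((List.range matrix.length).foldl (solveStep matrix matrix.length) (0, (matrix.length : Int) - 2)).1

-- ===== PORT B =====
def solve_alt (matrix : List (List Int)) : Int :=
  let n : Int := matrix.length
  ((PySem.List.enumerate matrix 0).flatMap (fun p =>
      (PySem.List.enumerate p.2 0).filterMap (fun q =>
        if p.1 = 0 ∨ p.1 = n - 1 ∨ q.1 = n - 1 - p.1 then some q.2 else none))).sum

-- ===== PRECONDITION & SPEC =====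
-- Pre_ excludes exactly the ragged matrices on which Python A raises IndexError:
-- a middle row i (1 ≤ i ≤ n-2) shorter than n-i, so matrix[i][n-1-i] is out of range.
def Pre_solve (matrix : List (List Int)) : Prop :=
  ∀ i, i < matrix.length → 1 ≤ i → i + 1 < matrix.length →
    matrix.length - 1 - i < (matrix.getD i []).length
instance (matrix : List (List Int)) : Decidable (Pre_solve matrix) := by
  unfold Pre_solve; infer_instance

def pvWitness_solve : List (List Int) := [[1, 2, 3], [4, 5, 6], [7, 8, 9]]

def Spec_solve (matrix : List (List Int)) (out : Int) : Prop := out = solve_alt matrix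
instance (matrix : List (List Int)) (out : Int) : Decidable (Spec_solve matrix out) := by unfold Spec_solve; infer_instance

-- ===== CLAIM (what is proved, stated in full; the proofs are below) =====
def Claim_equal_solve : Prop := ∀ (matrix : List (List Int)), Dom_solve matrix → Pre_solve matrix → Spec_solve matrix (solve matrix)

-- ===== LEMMAS AND PROOFS =====

-- sum of a flatMap is the sum of the per-element sums
theorem sum_flatMap' {α : Type} (f : α → List Int) :
    ∀ (l : List α), (l.flatMap f).sum = (l.map (fun a => (f a).sum)).sum := by
  intro l
  induction l with
  | nil => simp
  | cons a l ih => simp [List.flatMap_cons, List.sum_append, ih]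

-- a row filtered down to a single target index picks exactly that entry (or nothing)
theorem row_pick : ∀ (l : List Int) (s t : Int),
    ((PySem.List.enumerate l s).filterMap
        (fun q => if q.1 = t then some q.2 else none)).sum
      = if s ≤ t ∧ t < s + l.length then l.getD (t - s).toNat 0 else 0 := by
  intro l
  induction l with
  | nil => intro s t; simp [PySem.List.enumerate_nil]
  | cons x l ih =>
    intro s t
    rw [PySem.List.enumerate_cons]
    by_cases hst : s = t
    · subst hst
      have hf : (List.filterMap (fun q : Int × Int => if q.1 = s then some q.2 else none)
            ((s, x) :: PySem.List.enumerate l (s + 1))).sum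
          = x + (List.filterMap (fun q : Int × Int => if q.1 = s then some q.2 else none)
            (PySem.List.enumerate l (s + 1))).sum := by simp
      rw [hf, ih, if_neg (by omega), if_pos ⟨le_refl _, by simp only [List.length_cons]; push_cast; omega⟩]
      simp
    · have hf : (List.filterMap (fun q : Int × Int => if q.1 = t then some q.2 else none)
            ((s, x) :: PySem.List.enumerate l (s + 1))).sum
          = (List.filterMap (fun q : Int × Int => if q.1 = t then some q.2 else none)
            (PySem.List.enumerate l (s + 1))).sum := by simp [hst]
      rw [hf, ih]
      by_cases hin : s + 1 ≤ t ∧ t < s + 1 + l.length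
      · rw [if_pos hin, if_pos (by constructor <;> [omega; (simp; omega)])]
        have h1 : (t - s).toNat = (t - (s + 1)).toNat + 1 := by omega
        rw [h1, List.getD_cons_succ]
      · rw [if_neg hin, if_neg (by simp; omega)]

-- a sum over enumerate equals the corresponding sum over range' with getD
theorem enum_sum (g : Int → List Int → Int) :
    ∀ (mid : List (List Int)) (s : Nat),
      ((PySem.List.enumerate mid (s : Int)).map (fun p => g p.1 p.2)).sum
        = ((List.range' s mid.length).map (fun (k : Nat) => g (k : Int) (mid.getD (k - s) []))).sum := by
  intro mid
  induction mid with
  | nil => intro s; simp [PySem.List.enumerate_nil]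
  | cons x l ih =>
    intro s
    rw [PySem.List.enumerate_cons, List.length_cons, List.range'_succ]
    simp only [List.map_cons, List.sum_cons]
    have hcast : ((s : Int) + 1) = ((s + 1 : Nat) : Int) := by push_cast; ring
    rw [hcast, ih (s + 1)]
    congr 1
    · simp
    · apply congrArg
      apply List.map_congr_left
      intro k hk
      have hk1 : s + 1 ≤ k := (List.mem_range'_1.mp hk).1
      have h2 : k - s = (k - (s + 1)) + 1 := by omega
      rw [h2, List.getD_cons_succ]

-- a foldl accumulating additions is the start plus the map-sum
theorem foldl_eq_mapsum (f : Nat → Int) :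
    ∀ (l : List Nat) (t : Int),
      l.foldl (fun (t : Int) i => t + f i) t = t + (l.map f).sum := by
  intro l
  induction l with
  | nil => simp
  | cons a l ih => intro t; simp only [List.foldl_cons, List.map_cons, List.sum_cons, ih]; ring

-- A's middle iterations maintain j = n-1-i
theorem solve_mid (matrix : List (List Int)) (n : Nat) :
    ∀ (k a : Nat) (t : Int), 1 ≤ a → a + k ≤ n - 1 →
    (List.range' a k).foldl (solveStep matrix n) (t, (n : Int) - 1 - (a : Int)) =
      ((List.range' a k).foldl
          (fun t i => t + PySem.List.pyGetD (matrix.getD i []) ((n : Int) - 1 - (i : Int)) 0) t,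
        (n : Int) - 1 - ((a + k : Nat) : Int)) := by
  intro k
  induction k with
  | zero => intro a t _ _; simp
  | succ k ih =>
    intro a t ha hak
    rw [List.range'_succ]
    have h0 : ¬ (a = 0 ∨ a = n - 1) := by
      rintro (h | h) <;> omega
    simp only [List.foldl_cons, solveStep, if_neg h0]
    have h1 : (n : Int) - 1 - (a : Int) - 1 = (n : Int) - 1 - ((a + 1 : Nat) : Int) := by
      push_cast; ring
    rw [h1, ih (a + 1) _ (by omega) (by omega)]
    have h2 : a + 1 + k = a + (k + 1) := by omega
    rw [h2]

-- range n = 0 :: middle ++ [n-1] for n = m+2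
theorem range_split (m : Nat) :
    List.range (m + 2) = 0 :: (List.range' 1 m ++ [m + 1]) := by
  rw [List.range_eq_range', show m + 2 = (m + 1) + 1 from rfl, List.range'_succ,
    List.range'_concat]
  simp [Nat.add_comm]

-- ===== VERDICT (by name: the statement is the Claim_ definition above) =====
theorem solve_spec : Claim_equal_solve := by
  intro matrix _ hpre
  unfold Spec_solve
  by_cases h0 : matrix.length = 0
  · rw [List.length_eq_zero_iff.mp h0]
    simp [solve, solve_alt, PySem.List.enumerate_nil]
  by_cases h1 : matrix.length = 1
  · obtain ⟨r, hr⟩ : ∃ r, matrix = [r] := by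
      match matrix, h1 with | [r], _ => exact ⟨r, rfl⟩
    subst hr
    simp [solve, solve_alt, solveStep, List.range_succ,
      PySem.List.enumerate_cons, PySem.List.enumerate_nil, PySem.List.map_snd_enumerate]
  -- n = mid.length + 2 : matrix = r0 :: mid ++ [rl]
  obtain ⟨r0, rest, hx⟩ : ∃ a b, matrix = a :: b := by
    cases matrix with
    | nil => simp at h0
    | cons a b => exact ⟨a, b, rfl⟩
  rcases List.eq_nil_or_concat rest with hr | ⟨mid, rl, hr⟩
  · subst hr; subst hx; simp at h1
  subst hr; subst hx
  have hpre' := hpre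
  clear hpre h0 h1
  simp only [List.concat_eq_append] at hpre' ⊢
  set L := r0 :: (mid ++ [rl]) with hL
  have hm2 : L.length = mid.length + 2 := by simp [hL]
  -- the common middle summand
  have hgetDmid : ∀ k, k < mid.length → L.getD (1 + k) [] = mid.getD k [] := by
    intro k hk
    rw [hL, show 1 + k = k + 1 from by omega, List.getD_cons_succ]
    have : (mid ++ [rl]).getD k [] = mid.getD k [] := by
      simp [List.getD_eq_getElem?_getD, List.getElem?_append_left hk]
    exact this
  -- A reduces to head-sum + middle map-sum + last-sum
  have hA : solve L = r0.sum +
      (((List.range' 1 mid.length).map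
          (fun i => PySem.List.pyGetD (mid.getD (i - 1) [])
            (((mid.length : Int) + 2) - 1 - (i : Int)) 0)).sum) + rl.sum := by
    simp only [solve, hm2]
    rw [range_split, List.foldl_cons]
    have hstep0 : solveStep L (mid.length + 2) (0, ((mid.length + 2 : Nat) : Int) - 2) 0
        = (r0.sum, ((mid.length + 2 : Nat) : Int) - 1 - ((1 : Nat) : Int)) := by
      simp [solveStep, hL]
      ring
    rw [hstep0, List.foldl_append,
      solve_mid L (mid.length + 2) mid.length 1 r0.sum (by omega) (by omega)]
    have hlast : (mid.length + 1 = 0 ∨ mid.length + 1 = (mid.length + 2) - 1) := by omega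
    simp only [List.foldl_cons, List.foldl_nil, solveStep]
    rw [if_pos hlast]
    have hgl : L.getD (mid.length + 1) [] = rl := by
      rw [hL, List.getD_cons_succ]
      simp [List.getD_eq_getElem?_getD]
    rw [hgl, foldl_eq_mapsum]
    have hmap : (List.range' 1 mid.length).map
          (fun i => PySem.List.pyGetD (L.getD i [])
            (((mid.length + 2 : Nat) : Int) - 1 - (i : Int)) 0)
        = (List.range' 1 mid.length).map
          (fun i => PySem.List.pyGetD (mid.getD (i - 1) [])
            (((mid.length : Int) + 2) - 1 - (i : Int)) 0) := by
      apply List.map_congr_left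
      intro i hi
      obtain ⟨hi1, hi2⟩ := List.mem_range'_1.mp hi
      have hg := hgetDmid (i - 1) (by omega)
      rw [show 1 + (i - 1) = i from by omega] at hg
      rw [hg]
      congr 1
    rw [hmap]
  -- B reduces to the same three pieces
  have hB : solve_alt L = r0.sum +
      (((PySem.List.enumerate mid 1).map
          (fun p => PySem.List.pyGetD p.2 (((mid.length : Int) + 2) - 1 - p.1) 0)).sum) + rl.sum := by
    simp only [solve_alt, hL]
    rw [PySem.List.enumerate_cons, PySem.List.enumerate_append]
    norm_num
    have hlast2 : (List.filterMap
          (fun x : Int × Int =>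
            if 1 + (mid.length : Int) = 0 ∨ 1 + (mid.length : Int) = (mid.length : Int) + 1 ∨
                x.1 = (mid.length : Int) + 1 - (1 + (mid.length : Int))
            then some x.2 else none)
          (PySem.List.enumerate rl)).sum = rl.sum := by
      simp [show (1 : Int) + (mid.length : Int) = (mid.length : Int) + 1 from by ring,
        PySem.List.map_snd_enumerate]
    rw [hlast2]
    have hmid : (List.flatMap
          (fun p : Int × List Int =>
            List.filterMap
              (fun x : Int × Int =>
                if p.1 = 0 ∨ p.1 = (mid.length : Int) + 1 ∨ x.1 = (mid.length : Int) + 1 - p.1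
                then some x.2 else none)
              (PySem.List.enumerate p.2))
          (PySem.List.enumerate mid 1)).sum
        = ((PySem.List.enumerate mid 1).map
            (fun p => PySem.List.pyGetD p.2 (((mid.length : Int) + 2) - 1 - p.1) 0)).sum := by
      rw [sum_flatMap']
      apply congrArg List.sum
      apply List.map_congr_left
      intro p hp
      obtain ⟨k, hk, hpk⟩ := (PySem.List.mem_enumerate_iff _ _ _).mp hp
      subst hpk
      dsimp only
      have hlen := hpre' (1 + k) (by omega) (by omega) (by omega)
      rw [hm2, hgetDmid k hk, List.getD_eq_getElem mid [] (by omega)] at hlen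
      have hcond : (fun x : Int × Int =>
            if (1 : Int) + (k : Int) = 0 ∨ (1 : Int) + (k : Int) = (mid.length : Int) + 1 ∨
                x.1 = (mid.length : Int) + 1 - ((1 : Int) + (k : Int))
            then some x.2 else none)
          = (fun x : Int × Int =>
            if x.1 = ((mid.length - k : Nat) : Int) then some x.2 else none) := by
        funext x
        apply if_congr _ rfl rfl
        constructor
        · rintro (h | h | h)
          · omega
          · omega
          · omega
        · intro h
          exact Or.inr (Or.inr (by omega))
      rw [hcond, row_pick,
        if_pos ⟨by omega, by omega⟩,
        show ((mid.length : Int) + 2) - 1 - ((1 : Int) + (k : Int))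
            = ((mid.length - k : Nat) : Int) from by omega]
      simp
    rw [hmid]
    ring
  have he := enum_sum
    (fun a r => PySem.List.pyGetD r (((mid.length : Int) + 2) - 1 - a) 0) mid 1
  simp only [Nat.cast_one] at he
  rw [hA, hB, he]
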